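-- pv_equiv track=rewrite | github.com/sukilsiva/competitve_coding | LongestSubstring.py | solve_code
-- ===== SOURCE A (Python) =====
-- from collections import defaultdict
--
-- def solve_code(string, k):
--     arr = []
--     result = defaultdict()
--     for i in string:
--         if i in result:
--             result[i] += 1
--         else:
--             result[i] = 1
--
--     for value in result:
--         if result[value] >= k:
--             arr.append(result[value])
--     return sum(arr)
-- ===== SOURCE B (Python) =====
-- def solve_code(string, k):
--     # sort, then sum run lengths >= k (run-length grouping instead of a hash-map counter)
--     total = 0
--     run = 0
--     prev = None
--     for c in sorted(string):
--         if c == prev: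
--             run += 1
--         else:
--             if run >= k:
--                 total += run
--             run = 1
--             prev = c
--     if run >= k:
--         total += run
--     return total
-- ===== Notes on version B (the rewrite author's own statement) =====
-- stated objective: alternative
-- what changed: Replaces the dict-based character counter and second pass over the dict with a sort-then-group run-length scan: sort the characters, walk the sorted list once accumulating the current run length, and add each run length that is >= k to the total.
import Mathlib
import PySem

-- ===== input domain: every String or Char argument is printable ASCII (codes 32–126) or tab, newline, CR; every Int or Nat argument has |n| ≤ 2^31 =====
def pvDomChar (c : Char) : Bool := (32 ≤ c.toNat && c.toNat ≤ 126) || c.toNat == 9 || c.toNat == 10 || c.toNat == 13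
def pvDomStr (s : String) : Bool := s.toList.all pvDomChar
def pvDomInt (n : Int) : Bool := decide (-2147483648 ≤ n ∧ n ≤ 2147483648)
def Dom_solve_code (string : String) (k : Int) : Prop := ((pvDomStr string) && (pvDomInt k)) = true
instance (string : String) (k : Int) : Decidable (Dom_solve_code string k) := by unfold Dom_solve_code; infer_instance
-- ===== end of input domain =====

-- B replaces A's dict-based counting with a sort-then-group run-length scan (alternative algorithm, same results).

-- ===== PORT A =====
def solve_code (string : String) (k : Int) : Int :=
  let result := string.toList.foldl
    (fun d i => if d.contains i then d.modify i 0 (· + 1) else d.insert i 1)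
    (PySem.Dict.empty : PySem.Dict Char Int)
  let arr := result.keys.foldl
    (fun arr value => if result.getD value 0 ≥ k then arr ++ [result.getD value 0] else arr)
    ([] : List Int)
  arr.foldl (· + ·) 0

-- ===== PORT B =====
-- fold state: (total, run, prev); after the loop the last run is flushed
def solve_code_alt (string : String) (k : Int) : Int :=
  let st := (PySem.List.sorted string.toList (fun c => c) false).foldl
    (fun (st : Int × Int × Option Char) c =>
      if some c = st.2.2 then (st.1, st.2.1 + 1, st.2.2)
      else ((if st.2.1 ≥ k then st.1 + st.2.1 else st.1), 1, some c))
    (0, 0, none)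
  if st.2.1 ≥ k then st.1 + st.2.1 else st.1

-- ===== PRECONDITION & SPEC =====
def Spec_solve_code (string : String) (k : Int) (out : Int) : Prop := out = solve_code_alt string k
instance (string : String) (k : Int) (out : Int) : Decidable (Spec_solve_code string k out) := by unfold Spec_solve_code; infer_instance

-- ===== CLAIM (what is proved, stated in full; the proofs are below) =====
def Claim_equal_solve_code : Prop := ∀ (string : String) (k : Int), Dom_solve_code string k → Spec_solve_code string k (solve_code string k)

-- ===== LEMMAS AND PROOFS =====

-- weight of one character: its count if the count reaches k, else 0
def pvW (k c : Int) : Int := if c ≥ k then c else 0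

-- the common value both programs compute: sum of weights over the distinct characters
def pvS (k : Int) (l : List Char) : Int :=
  ((PySem.List.dedup l).map (fun d => pvW k ((l.count d : Int)))).sum

-- B's loop body and flush, named (definitionally equal to solve_code_alt's lambdas)
def pvStep (k : Int) (st : Int × Int × Option Char) (c : Char) : Int × Int × Option Char :=
  if some c = st.2.2 then (st.1, st.2.1 + 1, st.2.2)
  else ((if st.2.1 ≥ k then st.1 + st.2.1 else st.1), 1, some c)

def pvFin (k : Int) (st : Int × Int × Option Char) : Int :=
  if st.2.1 ≥ k then st.1 + st.2.1 else st.1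

lemma sum_filter_map (p : Char → Bool) (f : Char → Int) :
    ∀ xs : List Char, ((xs.filter p).map f).sum = (xs.map (fun v => if p v then f v else 0)).sum := by
  intro xs
  induction xs with
  | nil => simp
  | cons x t ih => cases h : p x <;> simp [h, ih]

lemma dict_body_eq (d : PySem.Dict Char Int) (i : Char) :
    (if d.contains i then d.modify i 0 (· + 1) else d.insert i 1) = d.modify i 0 (· + 1) := by
  cases h : d.contains i with
  | true => simp
  | false => simp [PySem.Dict.modify, PySem.Dict.getD_of_not_contains d 0 h]

lemma a_listloop (k : Int) (cnt : Char → Int) :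
    ∀ (keys : List Char) (acc : List Int),
      keys.foldl (fun arr v => if cnt v ≥ k then arr ++ [cnt v] else arr) acc
        = acc ++ (keys.filter (fun v => decide (cnt v ≥ k))).map cnt := by
  intro keys
  induction keys with
  | nil => intro acc; simp
  | cons v t ih =>
    intro acc
    by_cases h : cnt v ≥ k
    · simp [h, ih]
    · simp [h, ih]

lemma a_eq (s : String) (k : Int) : solve_code s k = pvS k s.toList := by
  simp only [solve_code]
  simp only [dict_body_eq]
  rw [← PySem.Dict.counter_eq_foldl]
  simp only [PySem.Dict.getD_counter, PySem.Dict.keys_counter]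
  rw [a_listloop k (fun v => ((s.toList.count v : Int)))]
  rw [show ((· + ·) : Int → Int → Int) = (fun acc x => acc + id x) from rfl]
  rw [PySem.List.foldl_add]
  simp only [List.map_id, List.nil_append, zero_add]
  rw [sum_filter_map]
  unfold pvS pvW
  rw [PySem.List.dedup_eq_ofList]
  simp

-- ofList-fold through a head that never recurs commutes
lemma set_foldl_cons (x : Char) :
    ∀ (m s : List Char), (∀ y ∈ m, y ≠ x) →
      List.foldl PySem.Set.add (x :: s) m = x :: List.foldl PySem.Set.add s m := by
  intro m
  induction m with
  | nil => intro s _; rfl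
  | cons y t ih =>
    intro s h
    have hyx : y ≠ x := h y (by simp)
    have hadd : PySem.Set.add (x :: s) y = x :: PySem.Set.add s y := by
      by_cases hm : y ∈ s
      · simp [PySem.Set.add, PySem.Set.contains, hm, hyx]
      · simp [PySem.Set.add, PySem.Set.contains, hm, hyx]
    simp only [List.foldl_cons, hadd]
    exact ih (PySem.Set.add s y) (fun z hz => h z (by simp [hz]))

-- elements already present are dropped by the ofList fold
lemma set_foldl_filter (x : Char) :
    ∀ (m s : List Char), x ∈ s →
      List.foldl PySem.Set.add s m = List.foldl PySem.Set.add s (m.filter (· != x)) := by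
  intro m
  induction m with
  | nil => intro s _; rfl
  | cons y t ih =>
    intro s hx
    by_cases hyx : y = x
    · subst hyx
      have hadd : PySem.Set.add s y = s := by simp [PySem.Set.add, PySem.Set.contains, hx]
      simp only [List.filter_cons, bne_self_eq_false, Bool.false_eq_true, if_false,
        List.foldl_cons, hadd]
      exact ih s hx
    · have hmem : x ∈ PySem.Set.add s y := by
        rw [PySem.Set.mem_add]; exact Or.inl hx
      have hby : (y != x) = true := by simpa using hyx
      simp only [List.filter_cons, hby, if_true, List.foldl_cons]
      exact ih (PySem.Set.add s y) hmem

lemma dedup_cons (x : Char) (l : List Char) :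
    PySem.List.dedup (x :: l) = x :: PySem.List.dedup (l.filter (· != x)) := by
  rw [PySem.List.dedup_eq_ofList, PySem.List.dedup_eq_ofList]
  show List.foldl PySem.Set.add PySem.Set.empty (x :: l)
      = x :: List.foldl PySem.Set.add PySem.Set.empty (l.filter (· != x))
  rw [List.foldl_cons]
  have h0 : PySem.Set.add PySem.Set.empty x = ([x] : List Char) := by
    simp [PySem.Set.add, PySem.Set.empty, PySem.Set.contains]
  rw [h0, set_foldl_filter x l [x] (by simp)]
  exact set_foldl_cons x _ [] (fun y hy => by
    have := List.of_mem_filter hy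
    simpa using this)

lemma pvS_cons (k : Int) (x : Char) (rest : List Char) :
    pvS k (x :: rest) = pvW k ((rest.count x : Int) + 1)
      + ((PySem.List.dedup (rest.filter (· != x))).map (fun d => pvW k ((rest.count d : Int)))).sum := by
  unfold pvS
  rw [dedup_cons, List.map_cons, List.sum_cons, List.count_cons_self]
  have hmap : List.map (fun d => pvW k (((x :: rest).count d : Int)))
        (PySem.List.dedup (rest.filter (· != x)))
      = List.map (fun d => pvW k ((rest.count d : Int)))
        (PySem.List.dedup (rest.filter (· != x))) := by
    apply List.map_congr_left
    intro d hd
    have hdx : d ≠ x := by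
      have hmem := (PySem.List.mem_dedup _ d).mp hd
      have := List.of_mem_filter hmem
      simpa using this
    rw [List.count_cons_of_ne (Ne.symm hdx)]
  rw [hmap]
  push_cast
  ring

lemma bmain (k : Int) :
    ∀ (m : List Char), List.Pairwise (· ≤ ·) m →
      ∀ (c : Char) (total run : Int), (∀ x ∈ m, c ≤ x) →
        pvFin k (m.foldl (pvStep k) (total, run, some c))
        = total + pvW k (run + (m.count c : Int))
          + ((PySem.List.dedup (m.filter (· != c))).map (fun d => pvW k ((m.count d : Int)))).sum := by
  intro m
  induction m with
  | nil =>
    intro _ c total run _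
    simp only [List.foldl_nil, List.count_nil, List.filter_nil, Nat.cast_zero, add_zero]
    have hnil : PySem.List.dedup ([] : List Char) = [] := rfl
    rw [hnil]
    simp only [List.map_nil, List.sum_nil, add_zero]
    unfold pvFin pvW
    split_ifs <;> ring
  | cons x rest ih =>
    intro hp c total run hle
    obtain ⟨hhead, htail⟩ := List.pairwise_cons.mp hp
    by_cases hxc : x = c
    · subst hxc
      have hstep : pvStep k (total, run, some x) x = (total, run + 1, some x) := by
        simp [pvStep]
      rw [List.foldl_cons, hstep, ih htail x total (run + 1) hhead]
      simp only [List.count_cons_self, List.filter_cons, bne_self_eq_false, Bool.false_eq_true,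
        if_false]
      have hmap : List.map (fun d => pvW k (((x :: rest).count d : Int)))
            (PySem.List.dedup (rest.filter (· != x)))
          = List.map (fun d => pvW k ((rest.count d : Int)))
            (PySem.List.dedup (rest.filter (· != x))) := by
        apply List.map_congr_left
        intro d hd
        have hdx : d ≠ x := by
          have hmem := (PySem.List.mem_dedup _ d).mp hd
          have := List.of_mem_filter hmem
          simpa using this
        rw [List.count_cons_of_ne (Ne.symm hdx)]
      rw [hmap]
      push_cast
      rw [show run + 1 + ((rest.count x : Nat) : Int) = run + (((rest.count x : Nat) : Int) + 1) from by
        ring]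
    · have hcx : c < x := lt_of_le_of_ne (hle x (by simp)) (fun h => hxc h.symm)
      have hrest_le : ∀ y ∈ rest, x ≤ y := hhead
      have hcnotin : c ∉ (x :: rest) := by
        intro hmem
        rcases List.mem_cons.mp hmem with h | h
        · exact absurd h.symm hxc
        · exact absurd (hrest_le c h) (not_le.mpr hcx)
      have hstep : pvStep k (total, run, some c) x
          = ((if run ≥ k then total + run else total), 1, some x) := by
        simp [pvStep, (show ¬ (some x = some c) by simp [hxc])]
      rw [List.foldl_cons, hstep, ih htail x _ 1 hrest_le]
      have hcount0 : (x :: rest).count c = 0 := List.count_eq_zero.mpr hcnotin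
      have hfilter : (x :: rest).filter (· != c) = x :: rest := by
        apply List.filter_eq_self.mpr
        intro y hy
        have hcy : c < y := by
          rcases List.mem_cons.mp hy with h | h
          · exact h ▸ hcx
          · exact lt_of_lt_of_le hcx (hrest_le y h)
        simpa using (ne_of_gt hcy)
      rw [hcount0, hfilter]
      have hsum : ((PySem.List.dedup (x :: rest)).map (fun d => pvW k (((x :: rest).count d : Int)))).sum
          = pvS k (x :: rest) := rfl
      rw [hsum, pvS_cons]
      have hif : (if run ≥ k then total + run else total) = total + pvW k run := by
        unfold pvW; split_ifs <;> ring
      rw [hif]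
      simp only [Nat.cast_zero, add_zero]
      have h1 : (1 : Int) + (rest.count x : Int) = (rest.count x : Int) + 1 := by ring
      rw [h1]
      ring

lemma b_eq (s : String) (k : Int) :
    solve_code_alt s k = pvS k (PySem.List.sorted s.toList (fun c => c) false) := by
  have hdef : solve_code_alt s k
      = pvFin k ((PySem.List.sorted s.toList (fun c => c) false).foldl (pvStep k) (0, 0, none)) := rfl
  rw [hdef]
  have hp : (PySem.List.sorted s.toList (fun c => c) false).Pairwise (· ≤ ·) := by
    simpa using PySem.List.sorted_pairwise s.toList (fun c => c)
  cases hm : PySem.List.sorted s.toList (fun c => c) false with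
  | nil =>
    simp only [List.foldl_nil]
    have hnil : PySem.List.dedup ([] : List Char) = [] := rfl
    unfold pvFin pvS
    rw [hnil]
    simp only [List.map_nil, List.sum_nil]
    split_ifs <;> ring
  | cons x rest =>
    rw [hm] at hp
    obtain ⟨hhead, htail⟩ := List.pairwise_cons.mp hp
    have hstep : pvStep k ((0 : Int), (0 : Int), (none : Option Char)) x
        = ((if (0 : Int) ≥ k then (0 : Int) + 0 else 0), 1, some x) := by
      simp [pvStep]
    have h0 : (if (0 : Int) ≥ k then (0 : Int) + 0 else 0) = (0 : Int) := by split_ifs <;> ring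
    rw [List.foldl_cons, hstep, h0, bmain k rest htail x 0 1 hhead, pvS_cons]
    simp only [zero_add]
    congr 1
    congr 1
    ring

lemma pvS_perm (k : Int) {m l : List Char} (h : m.Perm l) : pvS k m = pvS k l := by
  unfold pvS
  have hc : ∀ d : Char, m.count d = l.count d := fun d => h.count_eq d
  have hd : (PySem.List.dedup m).Perm (PySem.List.dedup l) := by
    rw [List.perm_ext_iff_of_nodup (PySem.List.nodup_dedup m) (PySem.List.nodup_dedup l)]
    intro a
    rw [PySem.List.mem_dedup, PySem.List.mem_dedup]
    exact h.mem_iff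
  calc ((PySem.List.dedup m).map (fun d => pvW k ((m.count d : Int)))).sum
      = ((PySem.List.dedup m).map (fun d => pvW k ((l.count d : Int)))).sum := by
        simp only [hc]
    _ = ((PySem.List.dedup l).map (fun d => pvW k ((l.count d : Int)))).sum :=
        (hd.map _).sum_eq

-- ===== VERDICT (by name: the statement is the Claim_ definition above) =====
theorem solve_code_spec : Claim_equal_solve_code := by
  intro s k _
  show solve_code s k = solve_code_alt s k
  rw [a_eq, b_eq]
  exact (pvS_perm k (PySem.List.sorted_perm s.toList (fun c => c) false)).symm
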